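-- pv_equiv track=rewrite | github.com/mosheng20205/demand_radar | radar/notify.py | _group_source_runs
-- ===== SOURCE A (Python) =====
-- from collections import Counter, defaultdict
--
-- def _group_source_runs(source_runs: list[tuple[str, str, int]]) -> list[str]:
--     grouped: dict[str, dict[str, int]] = defaultdict(lambda: defaultdict(int))
--     for source_name, status, count in source_runs:
--         grouped[str(source_name)][str(status)] += int(count or 0)
--
--     lines: list[str] = []
--     for source_name in sorted(grouped):
--         parts = [f"{status}:{grouped[source_name][status]}" for status in sorted(grouped[source_name])]
--         lines.append(f"- {source_name} {' | '.join(parts)}")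
--     return lines
-- ===== SOURCE B (Python) =====
-- def _group_source_runs(source_runs):
--     def total(src, st):
--         return sum(c for s, t, c in source_runs if s == src and t == st)
--     return [
--         "- {} {}".format(src, " | ".join(
--             "{}:{}".format(st, total(src, st))
--             for st in sorted({t for s, t, _ in source_runs if s == src})))
--         for src in sorted({s for s, _, _ in source_runs})
--     ]
-- ===== Notes on version B (the rewrite author's own statement) =====
-- stated objective: alternative
-- what changed: Replaces the defaultdict-of-defaultdict aggregation pass with a dict-free formulation: sort the distinct sources once, and for each source/status group compute its count directly by a filtered sum over the input.
import Mathlib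
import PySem

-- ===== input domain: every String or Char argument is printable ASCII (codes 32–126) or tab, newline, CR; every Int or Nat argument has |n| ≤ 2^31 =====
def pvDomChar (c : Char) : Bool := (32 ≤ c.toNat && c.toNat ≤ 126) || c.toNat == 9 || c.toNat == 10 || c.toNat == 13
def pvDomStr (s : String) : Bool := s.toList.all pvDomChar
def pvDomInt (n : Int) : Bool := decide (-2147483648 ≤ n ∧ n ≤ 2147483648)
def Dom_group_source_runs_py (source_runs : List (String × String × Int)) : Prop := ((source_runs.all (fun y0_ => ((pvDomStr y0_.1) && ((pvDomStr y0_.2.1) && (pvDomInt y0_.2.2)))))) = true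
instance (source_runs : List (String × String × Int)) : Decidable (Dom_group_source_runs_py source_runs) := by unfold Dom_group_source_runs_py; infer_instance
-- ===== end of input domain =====

-- B replaces the defaultdict-of-defaultdict aggregation by sorted distinct keys with
-- per-group filtered sums (no dict at all): a different traversal of the data, not faster.

-- ===== PORT A =====
-- str(x) on a str argument is the identity; int(count or 0) = if count == 0 then 0 else count (exact on int).
def group_source_runs_py (source_runs : List (String × String × Int)) : List String :=
  let grouped : PySem.Dict String (PySem.Dict String Int) :=
    source_runs.foldl (fun d p =>
      d.modify p.1 PySem.Dict.empty
        (fun inner => inner.modify p.2.1 0 (· + (if p.2.2 == 0 then 0 else p.2.2))))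
      PySem.Dict.empty
  (PySem.List.sorted grouped.keys (fun x => x) false).foldl
    (fun lines s =>
      let inner := grouped.getD s PySem.Dict.empty
      let parts := (PySem.List.sorted inner.keys (fun x => x) false).map
        (fun t => t ++ ":" ++ PySem.Int.toStr (inner.getD t 0))
      lines ++ ["- " ++ s ++ " " ++ PySem.Str.join " | " parts]) []

-- ===== PORT B =====
def pvTotal (source_runs : List (String × String × Int)) (src st : String) : Int :=
  ((source_runs.filter (fun p => p.1 == src && p.2.1 == st)).map (fun p => p.2.2)).sum

def group_source_runs_py_alt (source_runs : List (String × String × Int)) : List String :=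
  (PySem.List.sorted (PySem.Set.ofList (source_runs.map (·.1))) (fun x => x) false).map
    (fun src =>
      "- " ++ src ++ " " ++ PySem.Str.join " | "
        ((PySem.List.sorted
            (PySem.Set.ofList ((source_runs.filter (fun p => p.1 == src)).map (fun p => p.2.1)))
            (fun x => x) false).map
          (fun st => st ++ ":" ++ PySem.Int.toStr (pvTotal source_runs src st))))

-- ===== PRECONDITION & SPEC =====
def Spec_group_source_runs_py (source_runs : List (String × String × Int)) (out : List String) : Prop := out = group_source_runs_py_alt source_runs
instance (source_runs : List (String × String × Int)) (out : List String) : Decidable (Spec_group_source_runs_py source_runs out) := by unfold Spec_group_source_runs_py; infer_instance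

-- ===== CLAIM (what is proved, stated in full; the proofs are below) =====
def Claim_equal_group_source_runs_py : Prop := ∀ (source_runs : List (String × String × Int)), Dom_group_source_runs_py source_runs → Spec_group_source_runs_py source_runs (group_source_runs_py source_runs)

-- ===== LEMMAS AND PROOFS =====

-- a 'for x: lines.append(f x)' loop is acc ++ map f
theorem pv_foldl_append_map {α β : Type} (l : List α) (acc : List β) (f : α → β) :
    l.foldl (fun a x => a ++ [f x]) acc = acc ++ l.map f := by
  induction l generalizing acc with
  | nil => simp
  | cons x l ih => simp [List.foldl_cons, ih]

-- the inner-dict step, named for reuse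
def pvIStep (d : PySem.Dict String Int) (p : String × String × Int) : PySem.Dict String Int :=
  d.modify p.2.1 0 (· + (if p.2.2 == 0 then 0 else p.2.2))

def pvOStep (d : PySem.Dict String (PySem.Dict String Int)) (p : String × String × Int) :
    PySem.Dict String (PySem.Dict String Int) :=
  d.modify p.1 PySem.Dict.empty (fun inner => pvIStep inner p)

theorem pv_getD_grouped (l : List (String × String × Int))
    (d : PySem.Dict String (PySem.Dict String Int)) (s : String) :
    (l.foldl pvOStep d).getD s PySem.Dict.empty
      = (l.filter (fun p => p.1 == s)).foldl pvIStep (d.getD s PySem.Dict.empty) := by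
  induction l generalizing d with
  | nil => rfl
  | cons p l ih =>
    simp only [List.foldl_cons, List.filter_cons]
    rw [ih]
    by_cases h : p.1 = s
    · simp only [h, beq_self_eq_true, if_pos, List.foldl_cons]
      have : (pvOStep d p).getD s PySem.Dict.empty = pvIStep (d.getD s PySem.Dict.empty) p := by
        simp [pvOStep, h]
      rw [this]
    · have hb : (p.1 == s) = false := beq_eq_false_iff_ne.mpr h
      simp only [hb, if_neg, Bool.false_eq_true, not_false_iff]
      have : (pvOStep d p).getD s PySem.Dict.empty = d.getD s PySem.Dict.empty := by
        simp [pvOStep, PySem.Dict.getD_modify, Ne.symm h]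
      rw [this]

theorem pv_inner_getD (m : List (String × String × Int)) (d : PySem.Dict String Int) (t : String) :
    (m.foldl pvIStep d).getD t 0
      = d.getD t 0 + ((m.filter (fun p => p.2.1 == t)).map
          (fun p => if p.2.2 == 0 then (0 : Int) else p.2.2)).sum := by
  induction m generalizing d with
  | nil => simp
  | cons p m ih =>
    simp only [List.foldl_cons, List.filter_cons]
    rw [ih]
    by_cases h : p.2.1 = t
    · simp only [h, beq_self_eq_true, if_pos, List.map_cons, List.sum_cons]
      have : (pvIStep d p).getD t 0 = d.getD t 0 + (if p.2.2 == 0 then (0:Int) else p.2.2) := by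
        simp [pvIStep, h]
      rw [this]; ring
    · have hb : (p.2.1 == t) = false := beq_eq_false_iff_ne.mpr h
      simp only [hb, Bool.false_eq_true, if_neg, not_false_iff]
      have : (pvIStep d p).getD t 0 = d.getD t 0 := by
        simp [pvIStep, PySem.Dict.getD_modify, Ne.symm h]
      rw [this]

-- the two "int(count or 0)" sums agree: the if is the identity on Int
theorem pv_sum_if (m : List (String × String × Int)) :
    (m.map (fun p => if p.2.2 == 0 then (0 : Int) else p.2.2)).sum
      = (m.map (fun p => p.2.2)).sum := by
  congr 1
  apply List.map_congr_left
  intro p _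
  by_cases h : p.2.2 = 0 <;> simp [h]

theorem pv_grouped_keys (l : List (String × String × Int)) :
    (l.foldl pvOStep PySem.Dict.empty).keys = PySem.Set.ofList (l.map (fun p => p.1)) := by
  have h := PySem.Dict.keys_foldl_modify_key l (fun p => p.1) PySem.Dict.empty
      (fun _ p => fun inner => pvIStep inner p) PySem.Dict.empty
  simp only [PySem.Dict.keys_empty, PySem.Set.update_nil_left] at h
  exact h

theorem pv_inner_keys (m : List (String × String × Int)) :
    (m.foldl pvIStep PySem.Dict.empty).keys = PySem.Set.ofList (m.map (fun p => p.2.1)) := by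
  have h := PySem.Dict.keys_foldl_modify_key m (fun p => p.2.1) (0 : Int)
      (fun _ p => (· + (if p.2.2 == 0 then 0 else p.2.2))) PySem.Dict.empty
  simp only [PySem.Dict.keys_empty, PySem.Set.update_nil_left] at h
  exact h

theorem pv_main (l : List (String × String × Int)) :
    group_source_runs_py l = group_source_runs_py_alt l := by
  unfold group_source_runs_py group_source_runs_py_alt
  rw [show (fun (d : PySem.Dict String (PySem.Dict String Int)) (p : String × String × Int) =>
        d.modify p.1 PySem.Dict.empty
          (fun inner => inner.modify p.2.1 0 (· + (if p.2.2 == 0 then 0 else p.2.2)))) = pvOStep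
      from rfl]
  rw [pv_foldl_append_map, List.nil_append, pv_grouped_keys]
  apply List.map_congr_left
  intro s _
  have hinner : (l.foldl pvOStep PySem.Dict.empty).getD s PySem.Dict.empty
      = (l.filter (fun p => p.1 == s)).foldl pvIStep PySem.Dict.empty := by
    rw [pv_getD_grouped]; rfl
  rw [hinner, pv_inner_keys]
  congr 2
  apply List.map_congr_left
  intro t _
  rw [pv_inner_getD]
  congr 2
  rw [pv_sum_if, pvTotal, ← List.filter_filter, List.filter_comm]
  simp

-- ===== VERDICT (by name: the statement is the Claim_ definition above) =====
theorem group_source_runs_py_spec : Claim_equal_group_source_runs_py := by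
  intro l _
  unfold Spec_group_source_runs_py
  exact pv_main l
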